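-- pv_equiv track=rewrite | github.com/kamilakostyliova-hue/projekt-wilno | backend/database.py | direction_label
-- ===== SOURCE A (Python) =====
-- def direction_label(bearing: int) -> str:
--     labels = [
--         (22.5, "idź na północ"),
--         (67.5, "idź na północny wschód"),
--         (112.5, "idź na wschód"),
--         (157.5, "idź na południowy wschód"),
--         (202.5, "idź na południe"),
--         (247.5, "idź na południowy zachód"),
--         (292.5, "idź na zachód"),
--         (337.5, "idź na północny zachód"),
--         (360.0, "idź na północ"),
--     ]
--     for limit, label in labels:
--         if bearing < limit:
--             return label
--     return "idź na północ"
-- ===== SOURCE B (Python) =====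
-- def direction_label(bearing: int) -> str:
--     labels = [
--         "idź na północ",
--         "idź na północny wschód",
--         "idź na wschód",
--         "idź na południowy wschód",
--         "idź na południe",
--         "idź na południowy zachód",
--         "idź na zachód",
--         "idź na północny zachód",
--     ]
--     if bearing < 0 or bearing >= 360:
--         return "idź na północ"
--     return labels[(2 * bearing + 45) // 90 % 8]
-- ===== Notes on version B (the rewrite author's own statement) =====
-- stated objective: simpler
-- what changed: Replaced the linear threshold scan over nine (limit,label) pairs with a closed-form sector index ((2*bearing+45)//90 % 8) into an 8-element label list, with a single range guard for bearings outside [0,360) which A sends to north.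
import Mathlib
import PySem

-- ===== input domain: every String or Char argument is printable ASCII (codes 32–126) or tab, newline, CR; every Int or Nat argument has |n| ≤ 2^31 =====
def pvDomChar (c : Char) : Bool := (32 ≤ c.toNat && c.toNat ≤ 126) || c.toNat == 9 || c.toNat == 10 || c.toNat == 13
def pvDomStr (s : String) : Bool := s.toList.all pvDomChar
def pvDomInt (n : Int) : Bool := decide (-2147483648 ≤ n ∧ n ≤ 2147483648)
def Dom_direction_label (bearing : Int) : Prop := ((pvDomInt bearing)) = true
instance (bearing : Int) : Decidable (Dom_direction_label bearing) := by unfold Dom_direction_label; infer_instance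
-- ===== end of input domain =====

-- B replaces A's linear threshold scan by a closed-form sector index into an 8-label list (simpler).

-- ===== PORT A =====
-- A compares the Int bearing against half-integer float limits 22.5, 67.5, …;
-- for an Int bearing, `bearing < limit` is exactly `2*bearing < 2*limit`, so the
-- table stores the DOUBLED limits as Ints (45, 135, …, 720): exact on the Int domain.
def dlTable : List (Int × String) :=
  [(45, "idź na północ"),
   (135, "idź na północny wschód"),
   (225, "idź na wschód"),
   (315, "idź na południowy wschód"),
   (405, "idź na południe"),
   (495, "idź na południowy zachód"),
   (585, "idź na zachód"),
   (675, "idź na północny zachód"),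
   (720, "idź na północ")]

def dlScan (bearing : Int) : List (Int × String) → String
  | [] => "idź na północ"
  | (limit2, label) :: rest => if 2 * bearing < limit2 then label else dlScan bearing rest

def direction_label (bearing : Int) : String := dlScan bearing dlTable

-- ===== PORT B =====
-- Python's labels[idx] with idx provably in [0,8) is exact as pyGetD (never the default).
def dlLabels : List String :=
  ["idź na północ",
   "idź na północny wschód",
   "idź na wschód",
   "idź na południowy wschód",
   "idź na południe",
   "idź na południowy zachód",
   "idź na zachód",
   "idź na północny zachód"]

def direction_label_alt (bearing : Int) : String :=
  if bearing < 0 ∨ 360 ≤ bearing then "idź na północ"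
  else PySem.List.pyGetD dlLabels
        (PySem.Int.mod (PySem.Int.floordiv (2 * bearing + 45) 90) 8) "idź na północ"

-- ===== PRECONDITION & SPEC =====
def Spec_direction_label (bearing : Int) (out : String) : Prop := out = direction_label_alt bearing
instance (bearing : Int) (out : String) : Decidable (Spec_direction_label bearing out) := by unfold Spec_direction_label; infer_instance

-- ===== CLAIM (what is proved, stated in full; the proofs are below) =====
def Claim_equal_direction_label : Prop := ∀ (bearing : Int), Dom_direction_label bearing → Spec_direction_label bearing (direction_label bearing)

-- ===== LEMMAS AND PROOFS =====

-- In sector k (i.e. 90k ≤ 2b+45 < 90(k+1), 0 ≤ b < 360) B's index expression evaluates to k % 8.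
theorem alt_sector (b k : Int)
    (hlo : k * 90 ≤ 2 * b + 45) (hhi : 2 * b + 45 < (k + 1) * 90) :
    PySem.Int.floordiv (2 * b + 45) 90 = k := by
  rw [PySem.Int.floordiv_eq_iff_of_pos (by norm_num)]
  omega

-- ===== VERDICT (by name: the statement is the Claim_ definition above) =====
theorem direction_label_spec : Claim_equal_direction_label := by
  intro b _
  unfold Spec_direction_label direction_label direction_label_alt
  by_cases hneg : b < 0
  · rw [if_pos (Or.inl hneg)]
    simp [dlScan, dlTable, show 2 * b < 45 by omega]
  · by_cases hbig : 360 ≤ b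
    · rw [if_pos (Or.inr hbig)]
      simp [dlScan, dlTable, show ¬ 2 * b < 45 by omega, show ¬ 2 * b < 135 by omega,
            show ¬ 2 * b < 225 by omega, show ¬ 2 * b < 315 by omega,
            show ¬ 2 * b < 405 by omega, show ¬ 2 * b < 495 by omega,
            show ¬ 2 * b < 585 by omega, show ¬ 2 * b < 675 by omega,
            show ¬ 2 * b < 720 by omega]
    · -- 0 ≤ b < 360 : split into the nine sectors
      have hin : ¬ (b < 0 ∨ 360 ≤ b) := by omega
      rcases (by omega :
          (b ≤ 22) ∨ (23 ≤ b ∧ b ≤ 67) ∨ (68 ≤ b ∧ b ≤ 112) ∨ (113 ≤ b ∧ b ≤ 157) ∨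
          (158 ≤ b ∧ b ≤ 202) ∨ (203 ≤ b ∧ b ≤ 247) ∨ (248 ≤ b ∧ b ≤ 292) ∨
          (293 ≤ b ∧ b ≤ 337) ∨ (338 ≤ b)) with
        h | h | h | h | h | h | h | h | h
      · rw [alt_sector b 0 (by omega) (by omega), if_neg hin]
        simp [dlScan, dlTable, show 2 * b < 45 by omega]
        decide
      · rw [alt_sector b 1 (by omega) (by omega), if_neg hin]
        simp [dlScan, dlTable, show ¬ 2 * b < 45 by omega, show 2 * b < 135 by omega]
        decide
      · rw [alt_sector b 2 (by omega) (by omega), if_neg hin]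
        simp [dlScan, dlTable, show ¬ 2 * b < 45 by omega, show ¬ 2 * b < 135 by omega, show 2 * b < 225 by omega]
        decide
      · rw [alt_sector b 3 (by omega) (by omega), if_neg hin]
        simp [dlScan, dlTable, show ¬ 2 * b < 45 by omega, show ¬ 2 * b < 135 by omega, show ¬ 2 * b < 225 by omega, show 2 * b < 315 by omega]
        decide
      · rw [alt_sector b 4 (by omega) (by omega), if_neg hin]
        simp [dlScan, dlTable, show ¬ 2 * b < 45 by omega, show ¬ 2 * b < 135 by omega, show ¬ 2 * b < 225 by omega, show ¬ 2 * b < 315 by omega, show 2 * b < 405 by omega]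
        decide
      · rw [alt_sector b 5 (by omega) (by omega), if_neg hin]
        simp [dlScan, dlTable, show ¬ 2 * b < 45 by omega, show ¬ 2 * b < 135 by omega, show ¬ 2 * b < 225 by omega, show ¬ 2 * b < 315 by omega, show ¬ 2 * b < 405 by omega, show 2 * b < 495 by omega]
        decide
      · rw [alt_sector b 6 (by omega) (by omega), if_neg hin]
        simp [dlScan, dlTable, show ¬ 2 * b < 45 by omega, show ¬ 2 * b < 135 by omega, show ¬ 2 * b < 225 by omega, show ¬ 2 * b < 315 by omega, show ¬ 2 * b < 405 by omega, show ¬ 2 * b < 495 by omega, show 2 * b < 585 by omega]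
        decide
      · rw [alt_sector b 7 (by omega) (by omega), if_neg hin]
        simp [dlScan, dlTable, show ¬ 2 * b < 45 by omega, show ¬ 2 * b < 135 by omega, show ¬ 2 * b < 225 by omega, show ¬ 2 * b < 315 by omega, show ¬ 2 * b < 405 by omega, show ¬ 2 * b < 495 by omega, show ¬ 2 * b < 585 by omega, show 2 * b < 675 by omega]
        decide
      · rw [alt_sector b 8 (by omega) (by omega), if_neg hin]
        simp [dlScan, dlTable, show ¬ 2 * b < 45 by omega, show ¬ 2 * b < 135 by omega, show ¬ 2 * b < 225 by omega, show ¬ 2 * b < 315 by omega, show ¬ 2 * b < 405 by omega, show ¬ 2 * b < 495 by omega, show ¬ 2 * b < 585 by omega, show ¬ 2 * b < 675 by omega, show 2 * b < 720 by omega]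
        decide
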